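-- pv_equiv track=rewrite | github.com/Lya-M1RA/Sidewalk_Robot_XJTLUxNUS | main/src/motor_control/motor_control/local_controller.py | TargetPosition
-- ===== SOURCE A (Python) =====
-- def GenerateFrame(data_byte_num, index_num, data):
--
--     data_byte_num_dict = {
--     1: 0x2F,
--     2: 0x2B,
--     3: 0x27,
--     4: 0x23,
--     5: 0x40,
--     }
--
--     frame_data = [data_byte_num_dict.get(data_byte_num)] + index_num + [0x00] + data
--
--     return frame_data
--
-- def TargetPosition(position):
--
--     param = int(position)
--
--     data = []
--     for i in range(0,4):
--         digit = i * 8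
--         data.append((param >> digit) & 0xFF)
--
--     frame_data = GenerateFrame(4, [0x03, 0x20], data)
--
--     return frame_data
-- ===== SOURCE B (Python) =====
-- def _le_bytes(q, n):
--     # little-endian bytes of nonnegative q by recursive divmod peeling
--     if n == 0:
--         return []
--     q, r = divmod(q, 256)
--     return [r] + _le_bytes(q, n - 1)
--
-- def TargetPosition(position):
--     param = int(position)
--     return [0x23, 0x03, 0x20, 0x00] + _le_bytes(param % 0x100000000, 4)
-- ===== Notes on version B (the rewrite author's own statement) =====
-- stated objective: simpler
-- what changed: The GenerateFrame helper with its dict lookup is collapsed into a constant header literal, and the indexed shift-and-mask loop is replaced by recursive divmod peeling that repeatedly divides the value by 256.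
import Mathlib
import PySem

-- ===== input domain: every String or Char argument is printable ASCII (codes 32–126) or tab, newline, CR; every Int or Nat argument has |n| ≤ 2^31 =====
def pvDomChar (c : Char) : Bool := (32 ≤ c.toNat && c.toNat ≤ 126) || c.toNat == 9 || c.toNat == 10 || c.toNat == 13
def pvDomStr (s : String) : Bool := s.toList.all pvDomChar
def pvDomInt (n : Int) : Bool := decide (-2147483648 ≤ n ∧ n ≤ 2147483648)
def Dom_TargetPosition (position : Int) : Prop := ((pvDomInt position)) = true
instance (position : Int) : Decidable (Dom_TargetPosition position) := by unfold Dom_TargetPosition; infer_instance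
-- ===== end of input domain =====

-- B folds the GenerateFrame helper into a constant header literal and replaces the
-- indexed shift-and-mask loop by recursive divmod peeling (simpler; same cost).

-- ===== PORT A =====
-- GenerateFrame of the Python A. The dict lookup `.get(data_byte_num)` is ported
-- with (get? …).getD 0; the sole call passes the literal 4, which is present.
def pvGenerateFrame (data_byte_num : Int) (index_num : List Int) (data : List Int) : List Int :=
  let d : PySem.Dict Int Int :=
    PySem.Dict.ofList [(1, 0x2F), (2, 0x2B), (3, 0x27), (4, 0x23), (5, 0x40)]
  [(PySem.Dict.get? d data_byte_num).getD 0] ++ index_num ++ [0x00] ++ data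

-- `(param >> digit) & 0xFF` is ported as `mod (floordiv param 2^digit) 256`,
-- which is exact for Python's arbitrary-precision ints of any sign.
def TargetPosition (position : Int) : List Int :=
  let param := position
  let data := (PySem.List.pyRange 0 4 1).foldl (fun data i =>
    let digit := i * 8
    data ++ [PySem.Int.mod (PySem.Int.floordiv param (2 ^ digit.toNat)) 256]) []
  pvGenerateFrame 4 [0x03, 0x20] data

-- ===== PORT B =====
-- `divmod(q, 256)` is floordiv/mod; the recursion mirrors Source B's _le_bytes.
def pvLeBytes (q : Int) (n : Nat) : List Int :=
  match n with
  | 0 => []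
  | Nat.succ m => PySem.Int.mod q 256 :: pvLeBytes (PySem.Int.floordiv q 256) m

def TargetPosition_alt (position : Int) : List Int :=
  let param := position
  [0x23, 0x03, 0x20, 0x00] ++ pvLeBytes (PySem.Int.mod param 0x100000000) 4

-- ===== PRECONDITION & SPEC =====
def Spec_TargetPosition (position : Int) (out : List Int) : Prop := out = TargetPosition_alt position
instance (position : Int) (out : List Int) : Decidable (Spec_TargetPosition position out) := by unfold Spec_TargetPosition; infer_instance

-- ===== CLAIM (what is proved, stated in full; the proofs are below) =====
def Claim_equal_TargetPosition : Prop := ∀ (position : Int), Dom_TargetPosition position → Spec_TargetPosition position (TargetPosition position)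

-- ===== LEMMAS AND PROOFS =====

-- ===== VERDICT (by name: the statement is the Claim_ definition above) =====
theorem TargetPosition_spec : Claim_equal_TargetPosition := by
  intro p _
  show _ = _
  simp only [TargetPosition, TargetPosition_alt, PySem.List.pyRange, pvGenerateFrame, pvLeBytes,
    PySem.Int.floordiv_eq_ediv_of_pos (by norm_num : (0:Int) < 256),
    PySem.Int.mod_eq_emod_of_pos (by norm_num : (0:Int) < 256),
    PySem.Int.mod_eq_emod_of_pos (by norm_num : (0:Int) < 4294967296)]
  norm_num [List.foldl]
  simp only [show Int.toNat 4 = 4 from rfl, List.range_succ, List.range_zero,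
    List.map_append, List.map_nil, List.map_cons]
  norm_num
  simp only [show (2:Int) ^ Int.toNat 8 = 256 from rfl,
    show (2:Int) ^ Int.toNat 16 = 65536 from rfl,
    show (2:Int) ^ Int.toNat 24 = 16777216 from rfl,
    (by decide : ((PySem.Dict.ofList [((1:Int),(47:Int)),(2,43),(3,39),(4,35),(5,64)]).get? 4).getD 0 = 35)]
  refine ⟨trivial, by omega, ?_, ?_⟩
  · rw [Int.ediv_ediv_of_nonneg (by norm_num : (0:Int) ≤ 256)]; omega
  · rw [Int.ediv_ediv_of_nonneg (by norm_num : (0:Int) ≤ 256),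
        Int.ediv_ediv_of_nonneg (by norm_num : (0:Int) ≤ 256)]; omega
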